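-- pv_equiv track=rewrite | github.com/sohitkumar7505/job_matching_langgraph | main.py | route_by_category
-- ===== SOURCE A (Python) =====
-- def route_by_category(state):
--     jobs = state["jobs"]
--     high = [j for j in jobs if j["category"] == "HIGH"]
--     medium = [j for j in jobs if j["category"] == "MEDIUM"]
--     low = [j for j in jobs if j["category"] == "LOW"]
--
--     if high:
--         return "full_pipeline"
--     elif medium:
--         return "quick_pipeline"
--     else:
--         return "skip"
-- ===== SOURCE B (Python) =====
-- _RANK = {"HIGH": 2, "MEDIUM": 1}
-- _ROUTE = ("skip", "quick_pipeline", "full_pipeline")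
--
-- def route_by_category(state):
--     rank = max((_RANK.get(j["category"], 0) for j in state["jobs"]), default=0)
--     return _ROUTE[rank]
-- ===== Notes on version B (the rewrite author's own statement) =====
-- stated objective: simpler
-- what changed: Replaces the three presence-filter lists and the if/elif chain by mapping each job's category to a numeric rank, taking the maximum rank over all jobs, and indexing a routing table by that rank.
import Mathlib
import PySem

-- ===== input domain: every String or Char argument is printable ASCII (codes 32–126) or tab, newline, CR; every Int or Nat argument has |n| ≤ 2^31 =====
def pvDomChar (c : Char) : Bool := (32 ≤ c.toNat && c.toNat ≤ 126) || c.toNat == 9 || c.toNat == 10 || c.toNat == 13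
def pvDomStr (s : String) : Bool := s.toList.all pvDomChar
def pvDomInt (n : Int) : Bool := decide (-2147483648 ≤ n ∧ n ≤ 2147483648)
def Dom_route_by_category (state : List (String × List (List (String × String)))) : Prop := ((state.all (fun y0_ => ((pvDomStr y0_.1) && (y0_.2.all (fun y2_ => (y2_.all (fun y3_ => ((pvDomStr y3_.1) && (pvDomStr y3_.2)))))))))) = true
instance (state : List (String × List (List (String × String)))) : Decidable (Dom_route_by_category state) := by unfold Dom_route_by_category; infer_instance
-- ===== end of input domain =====

-- ===== PORT A =====
-- B replaces A's three presence-filter lists and if/elif chain with a numeric-rank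
-- maximum indexed into a routing table (simpler). Both raise (KeyError) on a missing
-- "jobs"/"category" key; Pre_ excludes exactly those inputs.
def route_by_category (state : List (String × List (List (String × String)))) : String :=
  let jobs := (List.lookup "jobs" state).getD []
  let high := jobs.filter (fun j => (List.lookup "category" j).getD "" == "HIGH")
  let medium := jobs.filter (fun j => (List.lookup "category" j).getD "" == "MEDIUM")
  let _low := jobs.filter (fun j => (List.lookup "category" j).getD "" == "LOW")
  if high.isEmpty = false then "full_pipeline"
  else if medium.isEmpty = false then "quick_pipeline"
  else "skip"

-- ===== PORT B =====
-- _RANK.get(c, 0) ported as the if-chain over the dict's two keys; max(..., default=0)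
-- ported via PySem.List.max?/getD 0; the table index is always 0/1/2, so pyGet? is some.
def route_by_category_alt (state : List (String × List (List (String × String)))) : String :=
  let jobs := (List.lookup "jobs" state).getD []
  let ranks : List Int := jobs.map (fun j =>
      let c := (List.lookup "category" j).getD ""
      if c == "HIGH" then 2 else if c == "MEDIUM" then 1 else 0)
  let rank := (PySem.List.max? ranks (fun y => y)).getD 0
  (PySem.List.pyGet? ["skip", "quick_pipeline", "full_pipeline"] rank).getD ""

-- ===== PRECONDITION & SPEC =====
-- Pre_ excludes exactly the inputs where the Python A raises KeyError: state without a
-- "jobs" key, or a job without a "category" key.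
def Pre_route_by_category (state : List (String × List (List (String × String)))) : Prop :=
  (List.lookup "jobs" state).isSome = true ∧
  ∀ j ∈ (List.lookup "jobs" state).getD [], (List.lookup "category" j).isSome = true
instance (state : List (String × List (List (String × String)))) : Decidable (Pre_route_by_category state) := by unfold Pre_route_by_category; infer_instance
def pvWitness_route_by_category : (List (String × List (List (String × String)))) :=
  [("jobs", [[("category", "MEDIUM")], [("category", "LOW")]])]
def Spec_route_by_category (state : List (String × List (List (String × String)))) (out : String) : Prop := out = route_by_category_alt state
instance (state : List (String × List (List (String × String)))) (out : String) : Decidable (Spec_route_by_category state out) := by unfold Spec_route_by_category; infer_instance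

-- ===== CLAIM (what is proved, stated in full; the proofs are below) =====
def Claim_equal_route_by_category : Prop := ∀ (state : List (String × List (List (String × String)))), Dom_route_by_category state → Pre_route_by_category state → Spec_route_by_category state (route_by_category state)

-- ===== LEMMAS AND PROOFS =====

-- running max of the mapped ranks, from any nonnegative accumulator
lemma fold_max_ranks (jobs : List (List (String × String))) (m : Int) (hm : 0 ≤ m) :
    (jobs.map (fun j =>
        let c := (List.lookup "category" j).getD ""
        if c == "HIGH" then (2 : Int) else if c == "MEDIUM" then 1 else 0)).foldl max m
    = max m (if jobs.any (fun j => (List.lookup "category" j).getD "" == "HIGH") then 2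
             else if jobs.any (fun j => (List.lookup "category" j).getD "" == "MEDIUM") then 1
             else 0) := by
  induction jobs generalizing m with
  | nil => simp; omega
  | cons j rest ih =>
    rw [List.map_cons, List.foldl_cons,
        ih _ (le_trans hm (le_max_left m _))]
    simp only [List.any_cons]
    by_cases h1 : ((List.lookup "category" j).getD "" == "HIGH") = true <;>
      by_cases h2 : ((List.lookup "category" j).getD "" == "MEDIUM") = true <;>
      by_cases h3 : rest.any (fun j => (List.lookup "category" j).getD "" == "HIGH") = true <;>
      by_cases h4 : rest.any (fun j => (List.lookup "category" j).getD "" == "MEDIUM") = true <;>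
      simp [h1, h2, h3, h4] <;> omega

-- the max-with-default equals the rank of the best category present
lemma rank_eq (jobs : List (List (String × String))) :
    ((PySem.List.max? (jobs.map (fun j =>
        let c := (List.lookup "category" j).getD ""
        if c == "HIGH" then (2 : Int) else if c == "MEDIUM" then 1 else 0)) (fun y => y)).getD 0)
    = (if jobs.any (fun j => (List.lookup "category" j).getD "" == "HIGH") then 2
       else if jobs.any (fun j => (List.lookup "category" j).getD "" == "MEDIUM") then 1
       else 0) := by
  cases jobs with
  | nil => simp [PySem.List.max?]
  | cons j rest =>
    simp only [List.map_cons, PySem.List.max?_id_cons, Option.getD_some]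
    rw [fold_max_ranks _ _ (by split_ifs <;> omega)]
    simp only [List.any_cons]
    by_cases h1 : ((List.lookup "category" j).getD "" == "HIGH") = true <;>
      by_cases h2 : ((List.lookup "category" j).getD "" == "MEDIUM") = true <;>
      by_cases h3 : rest.any (fun j => (List.lookup "category" j).getD "" == "HIGH") = true <;>
      by_cases h4 : rest.any (fun j => (List.lookup "category" j).getD "" == "MEDIUM") = true <;>
      simp [h1, h2, h3, h4]

lemma filter_isEmpty_eq (p : α → Bool) (l : List α) :
    (l.filter p).isEmpty = !(l.any p) := by
  induction l with
  | nil => rfl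
  | cons a t ih =>
    by_cases h : p a = true <;> simp [List.any_cons, h, ih]

-- ===== VERDICT (by name: the statement is the Claim_ definition above) =====
theorem route_by_category_spec : Claim_equal_route_by_category := by
  intro state _ _
  unfold Spec_route_by_category route_by_category route_by_category_alt
  simp only [rank_eq, filter_isEmpty_eq]
  by_cases h1 : ((List.lookup "jobs" state).getD []).any
      (fun j => (List.lookup "category" j).getD "" == "HIGH") = true
  · simp [h1, PySem.List.pyGet?, PySem.List.pyIdx?]
  · by_cases h2 : ((List.lookup "jobs" state).getD []).any
        (fun j => (List.lookup "category" j).getD "" == "MEDIUM") = true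
    · simp [h1, h2, PySem.List.pyGet?, PySem.List.pyIdx?]
    · simp [h1, h2, PySem.List.pyGet?, PySem.List.pyIdx?]
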